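-- pv_equiv track=rewrite | github.com/JohnGreen1981/portfolio-poetryforge | poetryforge/phonetics/rhyme_scheme.py | _normalize_scheme
-- ===== SOURCE A (Python) =====
-- def _normalize_scheme(scheme: str) -> str:
--     """Нормализовать схему: заменить конкретные буквы на последовательные.
--
--     'EfEf' → 'AbAb', 'ccDD' → 'aaBB'
--     """
--     if not scheme:
--         return ""
--
--     mapping: dict[str, str] = {}
--     next_idx = 0
--
--     result = []
--     for ch in scheme:
--         key = ch.lower()
--         if key not in mapping:
--             mapping[key] = chr(ord("a") + next_idx)
--             next_idx += 1
--         normalized = mapping[key]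
--         if ch.isupper():
--             result.append(normalized.upper())
--         else:
--             result.append(normalized)
--
--     return "".join(result)
-- ===== SOURCE B (Python) =====
-- def _normalize_scheme(scheme: str) -> str:
--     """Normalize scheme: each character's letter rank is the number of distinct
--     lowered characters strictly before its first occurrence — no mapping table."""
--     low = scheme.lower()
--     out = []
--     for ch, k in zip(scheme, low):
--         letter = chr(ord("a") + len(set(low[: low.index(k)])))
--         out.append(letter.upper() if ch.isupper() else letter)
--     return "".join(out)
-- ===== Notes on version B (the rewrite author's own statement) =====
-- stated objective: alternative
-- what changed: Eliminates the lazily-grown mapping table and counter entirely: each character's letter is computed by a per-character closed form, the number of distinct lowered characters strictly before the first occurrence of its lowered form (len(set(low[:low.index(k)]))).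
import Mathlib
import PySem

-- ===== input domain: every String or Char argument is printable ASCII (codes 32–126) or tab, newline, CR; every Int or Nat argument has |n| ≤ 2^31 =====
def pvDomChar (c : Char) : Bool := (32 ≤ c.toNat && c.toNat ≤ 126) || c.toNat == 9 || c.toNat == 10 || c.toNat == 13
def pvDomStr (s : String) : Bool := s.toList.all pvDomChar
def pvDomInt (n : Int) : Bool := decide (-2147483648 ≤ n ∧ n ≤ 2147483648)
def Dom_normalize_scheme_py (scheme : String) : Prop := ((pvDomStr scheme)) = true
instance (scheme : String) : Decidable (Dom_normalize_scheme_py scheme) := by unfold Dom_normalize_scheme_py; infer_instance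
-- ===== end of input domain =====

-- B drops A's lazily-grown mapping table: each character's letter rank is computed by a
-- per-character closed form (number of distinct lowered chars before its first occurrence).
-- ===== PORT A =====
-- one loop step: lazily extend the mapping, then emit the mapped (case-preserved) letter
def aStep (st : PySem.Dict Char Char × Nat × List Char) (ch : Char) :
    PySem.Dict Char Char × Nat × List Char :=
  let m := st.1
  let n := st.2.1
  let res := st.2.2
  let key := PySem.Chars.lowerChar ch
  let mn := if m.contains key then (m, n) else (m.insert key (Char.ofNat (97 + n)), n + 1)
  -- mapping[key]: key was just ensured present, so the ' ' default is unreachable (no KeyError)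
  let normalized := (mn.1.get? key).getD ' '
  if PySem.Chars.isupper ch then (mn.1, mn.2, res ++ [PySem.Chars.upperChar normalized])
  else (mn.1, mn.2, res ++ [normalized])

def normalize_scheme_py (scheme : String) : String :=
  if scheme = "" then "" else
  (String.mk (scheme.toList.foldl aStep (PySem.Dict.empty, 0, [])).2.2)

-- ===== PORT B =====
-- len(set(low[:low.index(k)])); low[:i] with the nonnegative i returned by .index is List.take;
-- .index never raises here (k always occurs in low), so the getD 0 default is unreachable
-- len(set(...)) is the length of the distinct-element list (PySem.Set.len of it, as a Nat)
def bRank (low : List Char) (k : Char) : Nat :=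
  (PySem.Set.ofList (low.take ((PySem.List.index? low k).getD 0))).length

def normalize_scheme_py_alt (scheme : String) : String :=
  let low := PySem.Chars.lower scheme.toList
  String.mk ((scheme.toList.zip low).map (fun p =>
    let letter := Char.ofNat (97 + bRank low p.2)
    if PySem.Chars.isupper p.1 then PySem.Chars.upperChar letter else letter))

-- ===== PRECONDITION & SPEC =====
def Spec_normalize_scheme_py (scheme : String) (out : String) : Prop := out = normalize_scheme_py_alt scheme
instance (scheme : String) (out : String) : Decidable (Spec_normalize_scheme_py scheme out) := by unfold Spec_normalize_scheme_py; infer_instance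

-- ===== CLAIM (what is proved, stated in full; the proofs are below) =====
def Claim_equal_normalize_scheme_py : Prop := ∀ (scheme : String), Dom_normalize_scheme_py scheme → Spec_normalize_scheme_py scheme (normalize_scheme_py scheme)

-- ===== LEMMAS AND PROOFS =====

-- proof-side rendering function: A's dict value at key lower c, read off as "index in the
-- ordered list of distinct lowered characters"; the loop invariant below characterises A by it
def oldRender (keys : List Char) (c : Char) : Char :=
  let letter := Char.ofNat (97 + ((PySem.List.index? keys (PySem.Chars.lowerChar c)).getD 0))
  if PySem.Chars.isupper c then PySem.Chars.upperChar letter else letter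

-- index of an element of dedup A is unchanged by extending the underlying list on the right
lemma idx_stable (A B : List Char) (k : Char) (hk : k ∈ PySem.List.dedup A) :
    PySem.List.index? (PySem.List.dedup (A ++ B)) k = PySem.List.index? (PySem.List.dedup A) k := by
  simp only [PySem.List.dedup_eq_ofList] at *
  rw [PySem.Set.ofList_append, PySem.Set.update_eq_append_filter]
  exact PySem.List.index?_append_of_mem _ hk

lemma index?_append_singleton_of_ne (l : List Char) (x k : Char) (h : k ≠ x) :
    PySem.List.index? (l ++ [x]) k = PySem.List.index? l k := by
  by_cases hm : k ∈ l
  · exact PySem.List.index?_append_of_mem _ hm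
  · rw [(PySem.List.index?_eq_none_iff _ _).mpr hm, (PySem.List.index?_eq_none_iff _ _).mpr]
    simp [hm, h]

-- loop invariant for A: the dict is exactly "index in dedup of the lowered prefix, rendered as a letter"
lemma loopA (rest : List Char) : ∀ (p full : List Char) (m : PySem.Dict Char Char) (n : Nat) (res : List Char),
    full = p.map PySem.Chars.lowerChar ++ rest.map PySem.Chars.lowerChar →
    (∀ k, m.get? k = (PySem.List.index? (PySem.List.dedup (p.map PySem.Chars.lowerChar)) k).map
        (fun i => Char.ofNat (97 + i))) →
    n = (PySem.List.dedup (p.map PySem.Chars.lowerChar)).length →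
    (rest.foldl aStep (m, n, res)).2.2 = res ++ rest.map (oldRender (PySem.List.dedup full)) := by
  induction rest with
  | nil => intro p full m n res _ _ _; simp
  | cons c t ih =>
    intro p full m n res hfull hm hn
    have hfull' : full = (p ++ [c]).map PySem.Chars.lowerChar ++ t.map PySem.Chars.lowerChar := by
      simpa using hfull
    by_cases hc : PySem.Chars.lowerChar c ∈ PySem.List.dedup (p.map PySem.Chars.lowerChar)
    · -- key already mapped
      obtain ⟨i, hi⟩ := Option.isSome_iff_exists.mp ((PySem.List.index?_isSome_iff _ _).mpr hc)
      have hcont : m.contains (PySem.Chars.lowerChar c) = true := by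
        rw [PySem.Dict.contains_eq_isSome_get?, hm, hi]; rfl
      have hD : PySem.List.dedup ((p ++ [c]).map PySem.Chars.lowerChar)
          = PySem.List.dedup (p.map PySem.Chars.lowerChar) := by
        simp only [List.map_append, List.map_cons, List.map_nil, PySem.List.dedup_eq_ofList] at *
        rw [PySem.Set.ofList_append_singleton, PySem.Set.add_of_mem hc]
      have hstep : List.foldl aStep (m, n, res) (c :: t)
          = List.foldl aStep (m, n, res ++ [if PySem.Chars.isupper c
              then PySem.Chars.upperChar (Char.ofNat (97 + i)) else Char.ofNat (97 + i)]) t := by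
        simp only [List.foldl_cons, aStep, hcont, if_true, hm, hi, Option.map_some, Option.getD_some]
        split <;> rfl
      have hrender : oldRender (PySem.List.dedup full) c
          = (if PySem.Chars.isupper c then PySem.Chars.upperChar (Char.ofNat (97 + i))
             else Char.ofNat (97 + i)) := by
        unfold oldRender
        rw [hfull, idx_stable _ _ _ hc, hi]
        rfl
      rw [hstep, ih (p ++ [c]) full m n _ hfull' (by rw [hD]; exact hm) (by rw [hD]; exact hn),
        List.map_cons, ← hrender]
      simp
    · -- fresh key
      have hnone : PySem.List.index? (PySem.List.dedup (p.map PySem.Chars.lowerChar))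
          (PySem.Chars.lowerChar c) = none := (PySem.List.index?_eq_none_iff _ _).mpr hc
      have hcont : m.contains (PySem.Chars.lowerChar c) = false := by
        rw [PySem.Dict.contains_eq_isSome_get?, hm, hnone]; rfl
      have hD : PySem.List.dedup ((p ++ [c]).map PySem.Chars.lowerChar)
          = PySem.List.dedup (p.map PySem.Chars.lowerChar) ++ [PySem.Chars.lowerChar c] := by
        simp only [List.map_append, List.map_cons, List.map_nil, PySem.List.dedup_eq_ofList] at *
        rw [PySem.Set.ofList_append_singleton, PySem.Set.add_of_not_mem hc]
      have hm' : ∀ k, (m.insert (PySem.Chars.lowerChar c) (Char.ofNat (97 + n))).get? k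
          = (PySem.List.index? (PySem.List.dedup ((p ++ [c]).map PySem.Chars.lowerChar)) k).map
              (fun i => Char.ofNat (97 + i)) := by
        intro k
        rw [hD, PySem.Dict.get?_insert]
        by_cases hk : k = PySem.Chars.lowerChar c
        · subst hk
          rw [if_pos rfl, PySem.List.index?_append_singleton_self _ _ hc, hn]
          rfl
        · rw [if_neg hk, hm, index?_append_singleton_of_ne _ _ _ hk]
      have hstep : List.foldl aStep (m, n, res) (c :: t)
          = List.foldl aStep (m.insert (PySem.Chars.lowerChar c) (Char.ofNat (97 + n)), n + 1,
              res ++ [if PySem.Chars.isupper c then PySem.Chars.upperChar (Char.ofNat (97 + n))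
                      else Char.ofNat (97 + n)]) t := by
        simp only [List.foldl_cons, aStep, hcont, Bool.false_eq_true, if_false,
          PySem.Dict.get?_insert_self, Option.getD_some]
        split <;> rfl
      have hmem : PySem.Chars.lowerChar c ∈ PySem.List.dedup ((p ++ [c]).map PySem.Chars.lowerChar) := by
        rw [hD]; simp
      have hrender : oldRender (PySem.List.dedup full) c
          = (if PySem.Chars.isupper c then PySem.Chars.upperChar (Char.ofNat (97 + n))
             else Char.ofNat (97 + n)) := by
        unfold oldRender
        rw [hfull', idx_stable _ _ _ hmem, hD, PySem.List.index?_append_singleton_self _ _ hc, hn]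
        rfl
      rw [hstep, ih (p ++ [c]) full _ (n + 1) _ hfull' hm' (by rw [hD]; simp [hn]),
        List.map_cons, ← hrender]
      simp

-- the bridge: for an element of L, its index in dedup L IS the number of distinct
-- elements of L strictly before its first occurrence (B's closed form)
lemma rank_bridge (L : List Char) (k : Char) (h : k ∈ L) :
    PySem.List.index? (PySem.List.dedup L) k = some (bRank L k) := by
  obtain ⟨i, hi⟩ := Option.isSome_iff_exists.mp ((PySem.List.index?_isSome_iff _ _).mpr h)
  obtain ⟨pre, suf, hL, hlen, hpre⟩ := (PySem.List.index?_eq_some_iff _ _ _).mp hi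
  have hpre' : k ∉ PySem.List.dedup pre := by
    rw [PySem.List.mem_dedup]; exact hpre
  have hD : PySem.List.dedup (pre ++ [k]) = PySem.List.dedup pre ++ [k] := by
    simp only [PySem.List.dedup_eq_ofList] at hpre' ⊢
    rw [PySem.Set.ofList_append_singleton, PySem.Set.add_of_not_mem hpre']
  have hmem : k ∈ PySem.List.dedup (pre ++ [k]) := by rw [hD]; simp
  have htake : L.take i = pre := by
    rw [hL, ← hlen, List.take_left]
  have h1 : PySem.List.index? (PySem.List.dedup L) k
      = some (PySem.List.dedup pre).length := by
    have : L = (pre ++ [k]) ++ suf := by simp [hL]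
    rw [this, idx_stable _ _ _ hmem, hD,
      PySem.List.index?_append_singleton_self _ _ hpre']
  rw [h1]
  unfold bRank
  rw [hi, Option.getD_some, htake]
  simp [PySem.List.dedup_eq_ofList]

-- ===== VERDICT (by name: the statement is the Claim_ definition above) =====
theorem normalize_scheme_py_spec : Claim_equal_normalize_scheme_py := by
  intro scheme _
  unfold Spec_normalize_scheme_py normalize_scheme_py
  have halt : normalize_scheme_py_alt scheme
      = String.mk ((scheme.toList.zip (PySem.Chars.lower scheme.toList)).map (fun p =>
          let letter := Char.ofNat (97 + bRank (PySem.Chars.lower scheme.toList) p.2)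
          if PySem.Chars.isupper p.1 then PySem.Chars.upperChar letter else letter)) := rfl
  have hz : ∀ (l : List Char), l.zip (l.map PySem.Chars.lowerChar)
      = l.map (fun c => (c, PySem.Chars.lowerChar c)) := by
    intro l; induction l with
    | nil => rfl
    | cons a t ih => simp [ih]
  have hzip : (scheme.toList.zip (PySem.Chars.lower scheme.toList)).map (fun p =>
        let letter := Char.ofNat (97 + bRank (PySem.Chars.lower scheme.toList) p.2)
        if PySem.Chars.isupper p.1 then PySem.Chars.upperChar letter else letter)
      = scheme.toList.map (fun c =>
        let letter := Char.ofNat (97 + bRank (PySem.Chars.lower scheme.toList) (PySem.Chars.lowerChar c))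
        if PySem.Chars.isupper c then PySem.Chars.upperChar letter else letter) := by
    rw [PySem.Chars.lower, hz, List.map_map]; rfl
  have hpt : ∀ c ∈ scheme.toList, oldRender (PySem.List.dedup (PySem.Chars.lower scheme.toList)) c
      = (let letter := Char.ofNat (97 + bRank (PySem.Chars.lower scheme.toList) (PySem.Chars.lowerChar c))
         if PySem.Chars.isupper c then PySem.Chars.upperChar letter else letter) := by
    intro c hcmem
    have hk : PySem.Chars.lowerChar c ∈ PySem.Chars.lower scheme.toList := by
      rw [PySem.Chars.lower]; exact List.mem_map_of_mem hcmem
    unfold oldRender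
    rw [rank_bridge _ _ hk, Option.getD_some]
  by_cases hs : scheme = ""
  · subst hs; rfl
  · rw [if_neg hs, halt, hzip, ← List.map_congr_left hpt]
    have h := loopA scheme.toList [] (PySem.Chars.lower scheme.toList) PySem.Dict.empty 0 []
      (by simp [PySem.Chars.lower]) (by intro k; rfl) rfl
    simp only [List.nil_append] at h
    rw [h]
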